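-- pv_equiv track=rewrite | github.com/felicity-moro/CSC-110 | Assignments/assignment6.py | all_multiples
-- ===== SOURCE A (Python) =====
-- def all_multiples(lst:list[int], multiple:int)->bool:
--     '''
--     checks if all integers in given list is a multiple of the given
--     integer.
--
--     >>> all_multiples([1,2,3,4,5,6],1)
--     True
--     >>> all_multiples([1,2,3,4,5,6],4)
--     False
--     >>> all_multiples([0,0,0,0],1)
--     True
--     >>> all_multiples([0,0,0,0],0)
--     True
--     >>> all_multiples([5,10,15,20],5)
--     True
--     >>> all_multiples([],9)
--     True
--
--     '''
--
--     if (len(lst) == 0):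
--         return True
--
--     for index in range(len(lst)):
--         if (lst[index] != 0 and multiple == 0):
--             return False
--         elif (multiple != 0) and (lst[index]%multiple != 0):
--             return False
--
--     return True
-- ===== SOURCE B (Python) =====
-- def _gcd(a: int, b: int) -> int:
--     a, b = abs(a), abs(b)
--     while b:
--         a, b = b, a % b
--     return a
--
-- def all_multiples(lst: list[int], multiple: int) -> bool:
--     # Reduce the whole list to one number: g = gcd of all elements (g = 0 for []).
--     # multiple divides every element iff multiple divides g; g == 0 iff all elements are 0.
--     g = 0
--     for x in lst:
--         g = _gcd(g, x)
--     if multiple == 0: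
--         return g == 0
--     return g % multiple == 0
-- ===== Notes on version B (the rewrite author's own statement) =====
-- stated objective: alternative
-- what changed: Instead of testing each element's divisibility in a loop with a per-element zero-divisor case, B folds the list into a single aggregate (the gcd of all elements via a hand-written Euclid) and decides the answer with one final test: gcd == 0 when multiple == 0, else gcd % multiple == 0.
import Mathlib
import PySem

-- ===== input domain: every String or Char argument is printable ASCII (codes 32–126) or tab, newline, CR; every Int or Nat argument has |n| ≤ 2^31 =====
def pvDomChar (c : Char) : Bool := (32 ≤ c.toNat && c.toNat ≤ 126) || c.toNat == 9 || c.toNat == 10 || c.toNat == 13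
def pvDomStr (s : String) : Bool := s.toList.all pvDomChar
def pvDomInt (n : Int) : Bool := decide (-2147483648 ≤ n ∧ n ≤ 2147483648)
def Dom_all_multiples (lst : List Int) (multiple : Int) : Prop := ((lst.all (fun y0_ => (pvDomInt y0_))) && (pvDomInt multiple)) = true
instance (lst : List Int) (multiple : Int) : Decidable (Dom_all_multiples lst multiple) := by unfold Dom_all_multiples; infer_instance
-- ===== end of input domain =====

-- B replaces A's per-element divisibility loop with an aggregate-then-test algorithm:
-- fold the list to the gcd of all elements, then one final test (objective: alternative).

-- ===== PORT A =====
-- Loop of A: for index in range(len(lst)); structural recursion over the remaining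
-- elements, each step examining the current element.
def all_multiples_go (multiple : Int) : List Int → Bool
  | [] => true
  | x :: rest =>
      if x ≠ 0 && multiple == 0 then false
      else if multiple ≠ 0 && PySem.Int.mod x multiple ≠ 0 then false
      else all_multiples_go multiple rest

def all_multiples (lst : List Int) (multiple : Int) : Bool :=
  if lst.length == 0 then true
  else all_multiples_go multiple lst

-- ===== PORT B =====
-- Source B's hand-written Euclid loop (`while b: a, b = b, a % b`), on the absolute values.
def gcdLoop (a b : Nat) : Nat :=
  if h : b = 0 then a else gcdLoop b (a % b)
termination_by b
decreasing_by exact Nat.mod_lt _ (Nat.pos_of_ne_zero h)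

def pyGcd (a b : Int) : Int := (gcdLoop a.natAbs b.natAbs : Nat)

def all_multiples_alt (lst : List Int) (multiple : Int) : Bool :=
  let g := lst.foldl (fun g x => pyGcd g x) 0
  if multiple == 0 then g == 0 else PySem.Int.mod g multiple == 0

-- ===== PRECONDITION & SPEC =====
def Spec_all_multiples (lst : List Int) (multiple : Int) (out : Bool) : Prop := out = all_multiples_alt lst multiple
instance (lst : List Int) (multiple : Int) (out : Bool) : Decidable (Spec_all_multiples lst multiple out) := by unfold Spec_all_multiples; infer_instance

-- ===== CLAIM (what is proved, stated in full; the proofs are below) =====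
def Claim_equal_all_multiples : Prop := ∀ (lst : List Int) (multiple : Int), Dom_all_multiples lst multiple → Spec_all_multiples lst multiple (all_multiples lst multiple)

-- ===== LEMMAS AND PROOFS =====
theorem gcdLoop_eq_gcd (b a : Nat) : gcdLoop a b = Nat.gcd a b := by
  induction b using Nat.strong_induction_on generalizing a with
  | _ b ih =>
    by_cases h : b = 0
    · simp [gcdLoop, h]
    · rw [gcdLoop]
      simp only [h, dite_false]
      rw [ih (a % b) (Nat.mod_lt _ (Nat.pos_of_ne_zero h)) b]
      rw [Nat.gcd_comm a b, Nat.gcd_rec b a, Nat.gcd_comm]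

theorem pyGcd_eq (a b : Int) : pyGcd a b = (Int.gcd a b : Nat) := by
  simp [pyGcd, gcdLoop_eq_gcd, Int.gcd]

theorem dvd_pyGcd_iff (m a b : Int) : m ∣ pyGcd a b ↔ m ∣ a ∧ m ∣ b := by
  rw [pyGcd_eq]
  constructor
  · intro h
    exact ⟨h.trans (Int.gcd_dvd_left a b), h.trans (Int.gcd_dvd_right a b)⟩
  · intro ⟨h1, h2⟩
    have := Int.dvd_gcd (Int.natAbs_dvd.mpr h1) (Int.natAbs_dvd.mpr h2)
    rw [← Int.natAbs_dvd]
    exact_mod_cast this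

theorem dvd_foldl_gcd_iff (m : Int) (lst : List Int) (g : Int) :
    m ∣ lst.foldl (fun g x => pyGcd g x) g ↔ m ∣ g ∧ ∀ x ∈ lst, m ∣ x := by
  induction lst generalizing g with
  | nil => simp
  | cons x rest ih =>
    simp only [List.foldl_cons, ih, dvd_pyGcd_iff, List.mem_cons]
    constructor
    · rintro ⟨⟨hg, hx⟩, hr⟩
      exact ⟨hg, fun y hy => hy.elim (fun e => e ▸ hx) (hr y)⟩
    · rintro ⟨hg, hall⟩
      exact ⟨⟨hg, hall x (.inl rfl)⟩, fun y hy => hall y (.inr hy)⟩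

-- A's value, characterised pointwise.
theorem all_multiples_go_eq (multiple : Int) (lst : List Int) :
    all_multiples_go multiple lst =
      (if multiple = 0 then lst.all (fun x => x == 0)
       else lst.all (fun x => PySem.Int.mod x multiple == 0)) := by
  induction lst with
  | nil => by_cases h : multiple = 0 <;> simp [all_multiples_go, h]
  | cons x rest ih =>
    by_cases h : multiple = 0
    · by_cases hx : x = 0 <;> simp_all [all_multiples_go]
    · by_cases hx : PySem.Int.mod x multiple = 0 <;> simp_all [all_multiples_go]

-- ===== VERDICT (by name: the statement is the Claim_ definition above) =====
theorem all_multiples_spec : Claim_equal_all_multiples := by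
  intro lst multiple _
  unfold Spec_all_multiples all_multiples all_multiples_alt
  rcases eq_or_ne lst [] with rfl | hne
  · by_cases h : multiple = 0 <;>
      simp [h, beq_iff_eq, PySem.Int.mod_eq_zero_iff_dvd]
  · have hlen : (lst.length == 0) = false := by
      simp [List.length_eq_zero_iff, hne]
    rw [hlen]
    simp only [Bool.false_eq_true, if_false]
    rw [all_multiples_go_eq]
    by_cases h : multiple = 0
    · have h0 := dvd_foldl_gcd_iff 0 lst 0
      simp only [Int.zero_dvd] at h0
      simp only [h, beq_self_eq_true, if_pos]
      rw [Bool.eq_iff_iff]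
      simp only [List.all_eq_true, beq_iff_eq, h0]
      tauto
    · have hd := dvd_foldl_gcd_iff multiple lst 0
      simp only [if_neg h, if_neg (by simpa using h : ¬ (multiple == 0) = true)]
      rw [Bool.eq_iff_iff]
      simp only [List.all_eq_true, beq_iff_eq, PySem.Int.mod_eq_zero_iff_dvd, hd,
        dvd_zero, true_and]
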